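-- pv_equiv track=rewrite | github.com/amiralysaleh/Crypto-Scanner-v2.3 | src/crypto_analyzer.py | check_trend_consistency
-- ===== SOURCE A (Python) =====
-- def check_trend_consistency(trend_series):
--     """Check trend consistency in the time window"""
--     if len(trend_series) == 0:
--         return 'neutral'
--     if all(trend == 'up' for trend in trend_series):
--         return 'up'
--     if all(trend == 'down' for trend in trend_series):
--         return 'down'
--     return 'neutral'
-- ===== SOURCE B (Python) =====
-- def check_trend_consistency(trend_series):
--     """Check trend consistency in the time window"""
--     consensus = None
--     for trend in trend_series:
--         if consensus is None:
--             consensus = trend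
--         elif trend != consensus:
--             consensus = 'neutral'
--             break
--     if consensus == 'up' or consensus == 'down':
--         return consensus
--     return 'neutral'
-- ===== Notes on version B (the rewrite author's own statement) =====
-- stated objective: alternative
-- what changed: B makes a single pass with a consensus accumulator (first element, collapsed to 'neutral' and exited on the first disagreement) instead of A's length check plus two separate all(...) scans over the series.
import Mathlib
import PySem

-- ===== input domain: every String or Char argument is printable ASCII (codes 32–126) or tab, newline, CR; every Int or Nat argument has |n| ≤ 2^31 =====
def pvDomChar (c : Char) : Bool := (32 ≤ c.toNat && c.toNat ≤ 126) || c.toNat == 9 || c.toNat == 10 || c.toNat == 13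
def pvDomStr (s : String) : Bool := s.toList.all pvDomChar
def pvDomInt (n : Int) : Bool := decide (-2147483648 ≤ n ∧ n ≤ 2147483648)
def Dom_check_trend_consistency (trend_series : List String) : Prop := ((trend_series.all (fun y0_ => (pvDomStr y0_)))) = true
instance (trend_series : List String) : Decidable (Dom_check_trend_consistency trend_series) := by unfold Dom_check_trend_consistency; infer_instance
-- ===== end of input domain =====

-- B: one pass with a consensus accumulator (first element, collapsed to "neutral" on first disagreement) instead of A's two all(...) scans; alternative decomposition, same cost.


-- ===== PORT A =====
def check_trend_consistency (trend_series : List String) : String :=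
  if trend_series.length = 0 then "neutral"
  else if trend_series.all (fun trend => trend == "up") then "up"
  else if trend_series.all (fun trend => trend == "down") then "down"
  else "neutral"

-- ===== PORT B =====
-- single pass: consensus = first element, collapsed to "neutral" (and loop exited) on first disagreement
def ctcConsensusLoop : Option String → List String → Option String
  | c, [] => c
  | none, trend :: rest => ctcConsensusLoop (some trend) rest
  | some c, trend :: rest =>
      if trend ≠ c then some "neutral" else ctcConsensusLoop (some c) rest

def check_trend_consistency_alt (trend_series : List String) : String :=
  let consensus := ctcConsensusLoop none trend_series
  if consensus = some "up" ∨ consensus = some "down" then consensus.getD "neutral"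
  else "neutral"

-- ===== PRECONDITION & SPEC =====
def Spec_check_trend_consistency (trend_series : List String) (out : String) : Prop := out = check_trend_consistency_alt trend_series
instance (trend_series : List String) (out : String) : Decidable (Spec_check_trend_consistency trend_series out) := by unfold Spec_check_trend_consistency; infer_instance

-- ===== CLAIM (what is proved, stated in full; the proofs are below) =====
def Claim_equal_check_trend_consistency : Prop := ∀ (trend_series : List String), Dom_check_trend_consistency trend_series → Spec_check_trend_consistency trend_series (check_trend_consistency trend_series)

-- ===== LEMMAS AND PROOFS =====

theorem ctcConsensusLoop_some (c : String) (xs : List String) :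
    ctcConsensusLoop (some c) xs =
      (if xs.all (fun t => t == c) then some c else some "neutral") := by
  induction xs with
  | nil => simp [ctcConsensusLoop]
  | cons x rest ih =>
      by_cases h : x = c
      · simp [ctcConsensusLoop, h, ih]
      · simp [ctcConsensusLoop, h]

theorem check_trend_consistency_eq (xs : List String) :
    check_trend_consistency xs = check_trend_consistency_alt xs := by
  cases xs with
  | nil => simp [check_trend_consistency, check_trend_consistency_alt, ctcConsensusLoop]
  | cons x rest =>
      unfold check_trend_consistency check_trend_consistency_alt
      simp only [ctcConsensusLoop, ctcConsensusLoop_some, List.all_cons]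
      by_cases hall : rest.all (fun t => t == x) = true
      · by_cases hx : x = "up"
        · subst hx; simp [hall]
        · by_cases hxd : x = "down"
          · subst hxd; simp [hall]
          · simp [hall, hx, hxd]
      · have h1 : ((x == "up") && rest.all (fun t => t == "up")) ≠ true := by
          intro h
          simp only [Bool.and_eq_true, beq_iff_eq] at h
          exact hall (by simpa [h.1] using h.2)
        have h2 : ((x == "down") && rest.all (fun t => t == "down")) ≠ true := by
          intro h
          simp only [Bool.and_eq_true, beq_iff_eq] at h
          exact hall (by simpa [h.1] using h.2)
        simp [hall, h1, h2]

-- ===== VERDICT (by name: the statement is the Claim_ definition above) =====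
theorem check_trend_consistency_spec : Claim_equal_check_trend_consistency := by
  intro xs _
  unfold Spec_check_trend_consistency
  exact check_trend_consistency_eq xs
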